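-- pv_equiv track=rewrite | github.com/eliottcassidy2000/math | 04-computation/uniform_position_scalar_m.py | compute_M_entry
-- ===== SOURCE A (Python) =====
-- from itertools import permutations
--
-- def compute_M_entry(T, n, a, b):
--     if a == b:
--         val = 0
--         for perm in permutations(range(n)):
--             prod = 1
--             for k in range(n-1):
--                 prod *= T.get((perm[k], perm[k+1]), 0)
--             if prod > 0:
--                 pos = list(perm).index(a)
--                 val += (-1)**pos
--         return val
--     else:
--         from itertools import combinations as comb
--         U = [v for v in range(n) if v != a and v != b]
--         val = 0
--         for mask in range(1 << len(U)):
--             S_list = [U[k] for k in range(len(U)) if mask & (1 << k)]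
--             R = [U[k] for k in range(len(U)) if not (mask & (1 << k))]
--             sign = (-1)**len(S_list)
--             S_set = sorted(set(S_list) | {a})
--             R_set = sorted(set(R) | {b})
--             ea = 0
--             if len(S_set) == 1:
--                 ea = 1
--             else:
--                 for p in permutations(S_set):
--                     if p[-1] != a: continue
--                     prod = 1
--                     for k in range(len(p)-1):
--                         prod *= T.get((p[k], p[k+1]), 0)
--                     ea += prod
--             bb = 0
--             if len(R_set) == 1:
--                 bb = 1
--             else:
--                 for p in permutations(R_set):
--                     if p[0] != b: continue
--                     prod = 1
--                     for k in range(len(p)-1):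
--                         prod *= T.get((p[k], p[k+1]), 0)
--                     bb += prod
--             val += sign * ea * bb
--         return val
-- ===== SOURCE B (Python) =====
-- # Same value as A, but the permutation enumerations are replaced by
-- # memoized Held-Karp-style path-sum recursions over (remaining set, previous vertex).
-- def compute_M_entry(T, n, a, b):
--     def t(u, v):
--         return T.get((u, v), 0)
--
--     if a == b:
--         memo_c = {}
--
--         def cnt(S, prev):
--             # (#orderings of S whose chain product prev->... is positive,
--             #  #orderings whose chain product is negative)
--             if not S:
--                 return (1, 0)
--             key = (S, prev)
--             if key in memo_c:
--                 return memo_c[key]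
--             subs = [(t(prev, x), cnt(tuple(y for y in S if y != x), x)) for x in S]
--             p = m = 0
--             for w, sub in subs:
--                 if w > 0:
--                     p += sub[0]; m += sub[1]
--                 elif w < 0:
--                     p += sub[1]; m += sub[0]
--             memo_c[key] = (p, m)
--             return (p, m)
--
--         memo_w = {}
--
--         def wgt(S, prev):
--             # like cnt but each ordering is weighted by (-1)**(position of a in the
--             # full permutation); a is a member of S here.
--             key = (S, prev)
--             if key in memo_w:
--                 return memo_w[key]
--             sgn = (-1) ** (n - len(S))
--             subs = []
--             for x in S:
--                 if x == a:
--                     c = cnt(tuple(y for y in S if y != a), a)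
--                     subs.append((t(prev, x), (sgn * c[0], sgn * c[1])))
--                 else:
--                     subs.append((t(prev, x), wgt(tuple(y for y in S if y != x), x)))
--             p = m = 0
--             for w, sub in subs:
--                 if w > 0:
--                     p += sub[0]; m += sub[1]
--                 elif w < 0:
--                     p += sub[1]; m += sub[0]
--             memo_w[key] = (p, m)
--             return (p, m)
--
--         full = tuple(range(n))
--         val = 0
--         for x in full:
--             rest = tuple(y for y in full if y != x)
--             val += cnt(rest, a)[0] if x == a else wgt(rest, x)[0]
--         return val
--     else:
--         memo_e = {}
--
--         def pend(S, prev):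
--             # sum over orderings of S of the chain product prev -> ... -> last,
--             # restricted to chains ending at a (empty chain: 1 if prev == a).
--             if not S:
--                 return 1 if prev == a else 0
--             key = (S, prev)
--             if key in memo_e:
--                 return memo_e[key]
--             r = sum(t(prev, x) * pend(tuple(y for y in S if y != x), x) for x in S)
--             memo_e[key] = r
--             return r
--
--         memo_k = {}
--
--         def pall(S, prev):
--             # sum over all orderings of S of the chain product prev -> ... -> last.
--             if not S:
--                 return 1
--             key = (S, prev)
--             if key in memo_k:
--                 return memo_k[key]
--             r = sum(t(prev, x) * pall(tuple(y for y in S if y != x), x) for x in S)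
--             memo_k[key] = r
--             return r
--
--         U = [v for v in range(n) if v != a and v != b]
--         val = 0
--         for mask in range(1 << len(U)):
--             S_list = [U[k] for k in range(len(U)) if mask & (1 << k)]
--             R = [U[k] for k in range(len(U)) if not (mask & (1 << k))]
--             sign = (-1) ** len(S_list)
--             S_set = tuple(sorted(set(S_list) | {a}))
--             R_set = tuple(sorted(set(R) | {b}))
--             ea = sum(pend(tuple(y for y in S_set if y != x), x) for x in S_set)
--             bb = pall(tuple(y for y in R_set if y != b), b)
--             val += sign * ea * bb
--         return val
-- ===== Notes on version B (the rewrite author's own statement) =====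
-- stated objective: alternative
-- what changed: B replaces A's permutation enumerations by memoized Held-Karp-style path-sum recursions over (remaining vertex set, previous vertex) - tracking the product's sign and the parity of a's position for the a==b branch, and Hamiltonian-path sums ending at a / starting at b for the a!=b branch.
-- outside the precondition, e.g. on compute_M_entry({}, 2, 5, 5): A returns 0, B returns 0; on compute_M_entry({}, -3, 2, 2): A raises ValueError, B returns 0
import Mathlib
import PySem

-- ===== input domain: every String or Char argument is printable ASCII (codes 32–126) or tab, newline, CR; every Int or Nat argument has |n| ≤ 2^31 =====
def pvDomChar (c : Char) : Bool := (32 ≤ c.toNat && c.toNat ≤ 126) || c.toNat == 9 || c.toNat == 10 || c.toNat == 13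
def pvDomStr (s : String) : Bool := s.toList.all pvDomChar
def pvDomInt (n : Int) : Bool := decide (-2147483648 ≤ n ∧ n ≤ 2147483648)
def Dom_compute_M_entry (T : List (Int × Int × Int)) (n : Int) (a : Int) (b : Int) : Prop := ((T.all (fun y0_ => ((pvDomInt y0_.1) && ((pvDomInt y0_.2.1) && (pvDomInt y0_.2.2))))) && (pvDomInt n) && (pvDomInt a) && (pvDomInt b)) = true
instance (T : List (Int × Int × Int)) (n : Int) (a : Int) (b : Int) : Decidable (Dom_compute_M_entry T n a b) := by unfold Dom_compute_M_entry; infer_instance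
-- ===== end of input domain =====

-- B replaces A's permutation enumerations by memoized Held-Karp-style path-sum
-- recursions over (remaining vertex set, previous vertex): objective 'alternative'.

-- ===== PORT A =====
-- T.get((u, v), 0): first matching key (a Python dict's keys are distinct), default 0
def pvLk : List (Int × Int × Int) → Int → Int → Int
  | [], _, _ => 0
  | (i, j, w) :: rest, u, v => if i = u ∧ j = v then w else pvLk rest u v

def compute_M_entry (T : List (Int × Int × Int)) (n : Int) (a : Int) (b : Int) : Int :=
  if a = b then
    let rng := PySem.List.pyRange 0 n
    (PySem.List.permutations rng rng.length).foldl (fun val perm =>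
      let prod := (PySem.List.pyRange 0 (n - 1)).foldl
        (fun prod k => prod * pvLk T (PySem.List.pyGetD perm k 0) (PySem.List.pyGetD perm (k + 1) 0)) 1
      if prod > 0 then
        match PySem.List.index? perm a with
        | some pos => val + (-1 : Int) ^ pos
        | none => val          -- Python raises ValueError here; Pre_ excludes these inputs
      else val) 0
  else
    let U := (PySem.List.pyRange 0 n).filter (fun v => v != a && v != b)
    (PySem.List.pyRange 0 ((1 : Int) <<< U.length)).foldl (fun val mask =>
      let S_list := ((PySem.List.pyRange 0 (U.length : Int)).filter
          (fun k => PySem.Int.band mask ((1 : Int) <<< k.toNat) != 0)).map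
          (fun k => PySem.List.pyGetD U k 0)
      let R := ((PySem.List.pyRange 0 (U.length : Int)).filter
          (fun k => PySem.Int.band mask ((1 : Int) <<< k.toNat) == 0)).map
          (fun k => PySem.List.pyGetD U k 0)
      let sign := (-1 : Int) ^ S_list.length
      let S_set := PySem.List.sorted (PySem.Set.add (PySem.Set.ofList S_list) a) (fun x => x)
      let R_set := PySem.List.sorted (PySem.Set.add (PySem.Set.ofList R) b) (fun x => x)
      let ea :=
        if PySem.List.len S_set = 1 then 1 else
          (PySem.List.permutations S_set S_set.length).foldl (fun ea p =>
            if PySem.List.pyGetD p (-1) 0 ≠ a then ea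
            else ea + (PySem.List.pyRange 0 (PySem.List.len p - 1)).foldl
              (fun prod k => prod * pvLk T (PySem.List.pyGetD p k 0) (PySem.List.pyGetD p (k + 1) 0)) 1) 0
      let bb :=
        if PySem.List.len R_set = 1 then 1 else
          (PySem.List.permutations R_set R_set.length).foldl (fun bb p =>
            if PySem.List.pyGetD p 0 0 ≠ b then bb
            else bb + (PySem.List.pyRange 0 (PySem.List.len p - 1)).foldl
              (fun prod k => prod * pvLk T (PySem.List.pyGetD p k 0) (PySem.List.pyGetD p (k + 1) 0)) 1) 0
      val + sign * ea * bb) 0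

-- ===== PORT B =====
-- Source B's cnt: memoization dropped (pure recursion computes the identical values)
def pvCnt (T : List (Int × Int × Int)) (S : List Int) (prev : Int) : Int × Int :=
  if S.isEmpty then (1, 0)
  else
    (S.attach.map (fun x =>
        (pvLk T prev x.1, pvCnt T (S.filter (fun y => y != x.1)) x.1))).foldl
      (fun acc p =>
        if p.1 > 0 then (acc.1 + p.2.1, acc.2 + p.2.2)
        else if p.1 < 0 then (acc.1 + p.2.2, acc.2 + p.2.1)
        else acc) (0, 0)
termination_by S.length
decreasing_by
  all_goals first
    | exact x.2
    | (simp; exact x.2)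

-- Source B's wgt ((-1)**(n - len(S)) is only reached with len(S) ≤ n: Nat subtraction is exact there)
def pvWgt (T : List (Int × Int × Int)) (a n : Int) (S : List Int) (prev : Int) : Int × Int :=
  (S.attach.map (fun x =>
      (pvLk T prev x.1,
       if x.1 = a then
         ((-1 : Int) ^ (n.toNat - S.length) * (pvCnt T (S.filter (fun y => y != a)) a).1,
          (-1 : Int) ^ (n.toNat - S.length) * (pvCnt T (S.filter (fun y => y != a)) a).2)
       else pvWgt T a n (S.filter (fun y => y != x.1)) x.1))).foldl
    (fun acc p =>
      if p.1 > 0 then (acc.1 + p.2.1, acc.2 + p.2.2)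
      else if p.1 < 0 then (acc.1 + p.2.2, acc.2 + p.2.1)
      else acc) (0, 0)
termination_by S.length
decreasing_by
  all_goals first
    | exact x.2
    | (simp; exact x.2)

-- Source B's pend
def pvPend (T : List (Int × Int × Int)) (a : Int) (S : List Int) (prev : Int) : Int :=
  if S.isEmpty then (if prev = a then 1 else 0)
  else (S.attach.map (fun x =>
      pvLk T prev x.1 * pvPend T a (S.filter (fun y => y != x.1)) x.1)).sum
termination_by S.length
decreasing_by
  all_goals first
    | exact x.2
    | (simp; exact x.2)

-- Source B's pall
def pvPall (T : List (Int × Int × Int)) (S : List Int) (prev : Int) : Int :=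
  if S.isEmpty then 1
  else (S.attach.map (fun x =>
      pvLk T prev x.1 * pvPall T (S.filter (fun y => y != x.1)) x.1)).sum
termination_by S.length
decreasing_by
  all_goals first
    | exact x.2
    | (simp; exact x.2)

def compute_M_entry_alt (T : List (Int × Int × Int)) (n : Int) (a : Int) (b : Int) : Int :=
  if a = b then
    let full := PySem.List.pyRange 0 n
    full.foldl (fun val x =>
      let rest := full.filter (fun y => y != x)
      val + (if x = a then (pvCnt T rest a).1 else (pvWgt T a n rest x).1)) 0
  else
    let U := (PySem.List.pyRange 0 n).filter (fun v => v != a && v != b)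
    (PySem.List.pyRange 0 ((1 : Int) <<< U.length)).foldl (fun val mask =>
      let S_list := ((PySem.List.pyRange 0 (U.length : Int)).filter
          (fun k => PySem.Int.band mask ((1 : Int) <<< k.toNat) != 0)).map
          (fun k => PySem.List.pyGetD U k 0)
      let R := ((PySem.List.pyRange 0 (U.length : Int)).filter
          (fun k => PySem.Int.band mask ((1 : Int) <<< k.toNat) == 0)).map
          (fun k => PySem.List.pyGetD U k 0)
      let sign := (-1 : Int) ^ S_list.length
      let S_set := PySem.List.sorted (PySem.Set.add (PySem.Set.ofList S_list) a) (fun x => x)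
      let R_set := PySem.List.sorted (PySem.Set.add (PySem.Set.ofList R) b) (fun x => x)
      let ea := (S_set.map (fun x => pvPend T a (S_set.filter (fun y => y != x)) x)).sum
      let bb := pvPall T (R_set.filter (fun y => y != b)) b
      val + sign * ea * bb) 0

-- ===== PRECONDITION & SPEC =====
-- Pre_ excludes only a = b with a outside range(n): there list(perm).index(a) raises
-- ValueError on the first permutation whose product is positive (and where no product is
-- positive, A's returned 0 is reached only by skipping every permutation of that failing
-- lookup's loop — B returns 0 there too, but we exclude the whole corner uniformly).
def Pre_compute_M_entry (T : List (Int × Int × Int)) (n : Int) (a : Int) (b : Int) : Prop :=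
  a = b → (0 ≤ a ∧ a < n)
instance (T : List (Int × Int × Int)) (n : Int) (a : Int) (b : Int) : Decidable (Pre_compute_M_entry T n a b) := by unfold Pre_compute_M_entry; infer_instance

def pvWitness_compute_M_entry : (List (Int × Int × Int)) × Int × Int × Int :=
  ([(0, 1, 2), (1, 0, -1)], 2, 0, 0)

def Spec_compute_M_entry (T : List (Int × Int × Int)) (n : Int) (a : Int) (b : Int) (out : Int) : Prop := out = compute_M_entry_alt T n a b
instance (T : List (Int × Int × Int)) (n : Int) (a : Int) (b : Int) (out : Int) : Decidable (Spec_compute_M_entry T n a b out) := by unfold Spec_compute_M_entry; infer_instance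

-- ===== CLAIM (what is proved, stated in full; the proofs are below) =====
def Claim_equal_compute_M_entry : Prop := ∀ (T : List (Int × Int × Int)) (n : Int) (a : Int) (b : Int), Dom_compute_M_entry T n a b → Pre_compute_M_entry T n a b → Spec_compute_M_entry T n a b (compute_M_entry T n a b)

-- ===== LEMMAS AND PROOFS =====

-- chain product of edge lookups along prev :: q
def pvChain (T : List (Int × Int × Int)) : Int → List Int → Int
  | _, [] => 1
  | prev, x :: q => pvLk T prev x * pvChain T x q

-- product of edge lookups along a whole permutation p
def pvEdge (T : List (Int × Int × Int)) : List Int → Int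
  | [] => 1
  | x :: q => pvChain T x q

-- position of a in q (total form of list.index)
def pvIdx (q : List Int) (a : Int) : Nat := (PySem.List.index? q a).getD 0

lemma pv_chain_fold_nat (T : List (Int × Int × Int)) (p : List Int) :
    ∀ (x acc : Int),
    (List.range p.length).foldl
      (fun prod k => prod * pvLk T ((x :: p).getD k 0) ((x :: p).getD (k + 1) 0)) acc
    = acc * pvChain T x p := by
  induction p with
  | nil => intro x acc; simp [pvChain]
  | cons y q ih =>
    intro x acc
    rw [List.length_cons, List.range_succ_eq_map]
    simp only [List.foldl_cons, List.foldl_map, Nat.succ_eq_add_one, List.getD_cons_succ,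
      List.getD_cons_zero]
    simp only [List.getD_cons_succ] at ih
    rw [ih y]
    simp [pvChain, mul_assoc]

lemma pv_prod_fold_eq_edge (T : List (Int × Int × Int)) (p : List Int) :
    (PySem.List.pyRange 0 ((p.length : Int) - 1)).foldl
      (fun prod k => prod * pvLk T (PySem.List.pyGetD p k 0) (PySem.List.pyGetD p (k + 1) 0)) 1
    = pvEdge T p := by
  cases p with
  | nil =>
    rw [show ((List.length ([] : List Int) : Int) - 1) = -1 by simp]
    rw [PySem.List.pyRange_one_eq_nil (by norm_num)]
    rfl
  | cons x q =>
    rw [show (((x :: q).length : Int) - 1) = ((q.length : Nat) : Int) by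
      rw [List.length_cons]; push_cast; ring]
    rw [PySem.List.pyRange_zero_nat, List.foldl_map]
    have hcongr : List.foldl (fun prod (k : Nat) =>
        prod * pvLk T (PySem.List.pyGetD (x :: q) (↑k) 0) (PySem.List.pyGetD (x :: q) ((↑k) + 1) 0)) 1
        (List.range q.length)
      = List.foldl (fun prod (k : Nat) =>
        prod * pvLk T ((x :: q).getD k 0) ((x :: q).getD (k + 1) 0)) 1 (List.range q.length) := by
      apply PySem.List.foldl_congr_mem
      intro acc k _
      rw [show ((k : Int) + 1) = ((k + 1 : Nat) : Int) by push_cast; ring]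
      rw [PySem.List.pyGetD_natCast, PySem.List.pyGetD_natCast]
    rw [hcongr, pv_chain_fold_nat, one_mul]
    rfl

lemma pv_perm_sum_decomp (xs : List Int) (r : Nat) (F : List Int → Int)
    (hr : xs.length = r + 1) :
    ((PySem.List.permutations xs xs.length).map F).sum
    = ((List.range xs.length).map (fun i =>
        ((PySem.List.permutations (xs.eraseIdx i) r).map (fun q => F (xs.getD i 0 :: q))).sum)).sum := by
  rw [show PySem.List.permutations xs xs.length = PySem.List.permutations xs (r + 1) from by rw [hr]]
  rw [PySem.List.permutations_succ, List.map_flatMap, List.flatMap_def, List.sum_flatten,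
    List.map_map]
  refine congrArg List.sum (List.map_congr_left ?_)
  intro i hi
  have hlt : i < xs.length := List.mem_range.mp hi
  simp only [Function.comp_apply, List.getElem?_eq_getElem hlt, List.map_map]
  rw [List.getD_eq_getElem _ _ hlt]
  rfl

lemma pv_sum_range_eraseIdx (S : List Int) (hS : S.Nodup) (h : Int → List Int → Int) :
    ((List.range S.length).map (fun i => h (S.getD i 0) (S.eraseIdx i))).sum
    = (S.map (fun x => h x (S.filter (fun y => y != x)))).sum := by
  refine congrArg List.sum (List.ext_getElem (by simp) ?_)
  intro i h1 h2
  have hi : i < S.length := by simpa using h1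
  simp only [List.getElem_map, List.getElem_range]
  rw [List.getD_eq_getElem _ _ hi, ← List.Nodup.erase_getElem hS i hi,
    List.Nodup.erase_eq_filter hS]

lemma pv_foldl_pair_sum (l : List (Int × (Int × Int))) :
    l.foldl (fun acc p =>
        if p.1 > 0 then (acc.1 + p.2.1, acc.2 + p.2.2)
        else if p.1 < 0 then (acc.1 + p.2.2, acc.2 + p.2.1)
        else acc) ((0 : Int), (0 : Int))
    = ((l.map (fun p => if p.1 > 0 then p.2.1 else if p.1 < 0 then p.2.2 else 0)).sum,
       (l.map (fun p => if p.1 > 0 then p.2.2 else if p.1 < 0 then p.2.1 else 0)).sum) := by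
  have hbody : (fun (acc : Int × Int) (p : Int × Int × Int) =>
      if p.1 > 0 then (acc.1 + p.2.1, acc.2 + p.2.2)
      else if p.1 < 0 then (acc.1 + p.2.2, acc.2 + p.2.1)
      else acc)
    = (fun acc p => (acc.1 + (if p.1 > 0 then p.2.1 else if p.1 < 0 then p.2.2 else 0),
                     acc.2 + (if p.1 > 0 then p.2.2 else if p.1 < 0 then p.2.1 else 0))) := by
    funext acc p
    split_ifs <;> simp
  rw [hbody]
  simp only [PySem.List.foldl_prod_mk
    (f := fun (s : Int) (e : Int × Int × Int) =>
      s + (if e.1 > 0 then e.2.1 else if e.1 < 0 then e.2.2 else 0))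
    (g := fun (s : Int) (e : Int × Int × Int) =>
      s + (if e.1 > 0 then e.2.2 else if e.1 < 0 then e.2.1 else 0))]
  rw [PySem.List.foldl_add, PySem.List.foldl_add]
  simp

lemma pv_sum_unique_idx : ∀ (R : List Int) (b : Int) (g : List Int → Int),
    R.Nodup → b ∈ R →
    ((List.range R.length).map (fun i => if R.getD i 0 = b then g (R.eraseIdx i) else 0)).sum
    = g (R.erase b) := by
  intro R
  induction R with
  | nil => intro b g _ hb; simp at hb
  | cons x R' ih =>
    intro b g hnd hb
    rw [List.length_cons, List.range_succ_eq_map]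
    simp only [List.map_cons, List.map_map, List.sum_cons, Function.comp_def,
      Nat.succ_eq_add_one, List.getD_cons_succ, List.getD_cons_zero, List.eraseIdx_cons_succ,
      List.eraseIdx_cons_zero]
    by_cases hxb : x = b
    · subst hxb
      rw [List.erase_cons_head, if_pos rfl]
      have hnotin : x ∉ R' := (List.nodup_cons.mp hnd).1
      have hz : ((List.range R'.length).map
          (fun i => if R'.getD i 0 = x then g (x :: R'.eraseIdx i) else 0)).sum = 0 := by
        apply List.sum_eq_zero
        intro t ht
        obtain ⟨i, hi, rfl⟩ := List.mem_map.mp ht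
        have hlt : i < R'.length := List.mem_range.mp hi
        rw [if_neg]
        intro hEq
        exact hnotin (hEq ▸ (List.getD_eq_getElem R' 0 hlt ▸ List.getElem_mem hlt))
      rw [hz, add_zero]
    · rw [if_neg hxb, List.erase_cons_tail (by simpa using hxb), zero_add]
      exact ih b (fun l => g (x :: l)) (List.nodup_cons.mp hnd).2
        (by rcases List.mem_cons.mp hb with h | h; exact absurd h.symm hxb; exact h)

lemma pv_filter_ne_eq_erase (S : List Int) (hS : S.Nodup) (x : Int) :
    S.filter (fun y => y != x) = S.erase x :=
  (List.Nodup.erase_eq_filter hS x).symm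

lemma pv_filter_ne_length (S : List Int) (hS : S.Nodup) (x : Int) (hx : x ∈ S) :
    (S.filter (fun y => y != x)).length = S.length - 1 := by
  rw [pv_filter_ne_eq_erase S hS x, List.length_erase_of_mem hx]

lemma pv_idx_cons_self (q : List Int) (a : Int) : pvIdx (a :: q) a = 0 := by
  unfold pvIdx
  rw [PySem.List.index?_cons_self]
  rfl

lemma pv_idx_cons_ne (x a : Int) (q : List Int) (hxa : x ≠ a) (haq : a ∈ q) :
    pvIdx (x :: q) a = pvIdx q a + 1 := by
  unfold pvIdx
  rw [PySem.List.index?_cons_of_ne _ hxa]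
  obtain ⟨k, hk⟩ := Option.isSome_iff_exists.mp ((PySem.List.index?_isSome_iff q a).mpr haq)
  rw [hk]
  rfl

lemma pv_sign_sums (w : Int) (L : List (List Int)) (c : List Int → Int) (f : List Int → Int) :
    ((L.map (fun q => if 0 < w * c q then f q else 0)).sum
       = (if 0 < w then (L.map (fun q => if 0 < c q then f q else 0)).sum
          else if w < 0 then (L.map (fun q => if c q < 0 then f q else 0)).sum else 0))
  ∧ ((L.map (fun q => if w * c q < 0 then f q else 0)).sum
       = (if 0 < w then (L.map (fun q => if c q < 0 then f q else 0)).sum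
          else if w < 0 then (L.map (fun q => if 0 < c q then f q else 0)).sum else 0)) := by
  rcases lt_trichotomy w 0 with hw | hw | hw
  · rw [if_neg (asymm hw), if_pos hw, if_neg (asymm hw), if_pos hw]
    refine ⟨congrArg List.sum (List.map_congr_left fun q _ => if_congr ?_ rfl rfl),
            congrArg List.sum (List.map_congr_left fun q _ => if_congr ?_ rfl rfl)⟩
    · rw [mul_pos_iff]
      constructor
      · rintro (⟨h1, _⟩ | ⟨_, h2⟩)
        · exact absurd h1 (asymm hw)
        · exact h2
      · intro h; exact Or.inr ⟨hw, h⟩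
    · rw [mul_neg_iff]
      constructor
      · rintro (⟨h1, _⟩ | ⟨_, h2⟩)
        · exact absurd h1 (asymm hw)
        · exact h2
      · intro h; exact Or.inr ⟨hw, h⟩
  · subst hw
    simp
  · rw [if_pos hw, if_pos hw]
    refine ⟨congrArg List.sum (List.map_congr_left fun q _ => if_congr ?_ rfl rfl),
            congrArg List.sum (List.map_congr_left fun q _ => if_congr ?_ rfl rfl)⟩
    · rw [mul_pos_iff]
      constructor
      · rintro (⟨_, h2⟩ | ⟨h1, _⟩)
        · exact h2
        · exact absurd h1 (asymm hw)
      · intro h; exact Or.inl ⟨hw, h⟩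
    · rw [mul_neg_iff]
      constructor
      · rintro (⟨_, h2⟩ | ⟨h1, _⟩)
        · exact h2
        · exact absurd h1 (asymm hw)
      · intro h; exact Or.inl ⟨hw, h⟩

lemma pv_cnt_spec (T : List (Int × Int × Int)) :
    ∀ (m : Nat) (S : List Int) (prev : Int), S.length = m → S.Nodup →
    pvCnt T S prev
    = (((PySem.List.permutations S S.length).map
          (fun q => if 0 < pvChain T prev q then (1 : Int) else 0)).sum,
       ((PySem.List.permutations S S.length).map
          (fun q => if pvChain T prev q < 0 then (1 : Int) else 0)).sum) := by
  intro m
  induction m using Nat.strong_induction_on with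
  | _ m IH =>
    intro S prev hlen hnd
    by_cases hS : S = []
    · subst hS
      simp [pvCnt, PySem.List.permutations_zero, pvChain]
    · have hne : S.length ≠ 0 := by simpa [List.length_eq_zero_iff] using hS
      obtain ⟨r, hr⟩ : ∃ r, S.length = r + 1 := ⟨S.length - 1, by omega⟩
      rw [pvCnt, if_neg (by simpa [List.isEmpty_iff] using hS)]
      rw [List.attach_map_val
        (f := fun x => (pvLk T prev x, pvCnt T (S.filter (fun y => y != x)) x))]
      rw [pv_foldl_pair_sum, List.map_map, List.map_map]
      rw [pv_perm_sum_decomp S r _ hr, pv_perm_sum_decomp S r _ hr]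
      rw [pv_sum_range_eraseIdx S hnd (fun x l =>
        ((PySem.List.permutations l r).map
          (fun q => if 0 < pvChain T prev (x :: q) then (1 : Int) else 0)).sum)]
      rw [pv_sum_range_eraseIdx S hnd (fun x l =>
        ((PySem.List.permutations l r).map
          (fun q => if pvChain T prev (x :: q) < 0 then (1 : Int) else 0)).sum)]
      simp only [Prod.mk.injEq]
      constructor <;>
      · refine congrArg List.sum (List.map_congr_left ?_)
        intro x hx
        have hlenf : (S.filter (fun y => y != x)).length = r := by
          rw [pv_filter_ne_length S hnd x hx]; omega
        have hndf : (S.filter (fun y => y != x)).Nodup := List.Nodup.filter _ hnd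
        simp only [Function.comp_apply]
        rw [IH r (by omega) (S.filter (fun y => y != x)) x hlenf hndf, hlenf]
        simp only [show (fun q => if 0 < pvChain T prev (x :: q) then (1 : Int) else 0)
              = (fun q => if 0 < pvLk T prev x * pvChain T x q then (1 : Int) else 0) from rfl,
          show (fun q => if pvChain T prev (x :: q) < 0 then (1 : Int) else 0)
              = (fun q => if pvLk T prev x * pvChain T x q < 0 then (1 : Int) else 0) from rfl,
          (pv_sign_sums (pvLk T prev x)
            (PySem.List.permutations (S.filter (fun y => y != x)) r)
            (fun q => pvChain T x q) (fun _ => (1 : Int))).1,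
          (pv_sign_sums (pvLk T prev x)
            (PySem.List.permutations (S.filter (fun y => y != x)) r)
            (fun q => pvChain T x q) (fun _ => (1 : Int))).2,
          gt_iff_lt]

lemma pv_wgt_spec (T : List (Int × Int × Int)) (a n : Int) :
    ∀ (m : Nat) (S : List Int) (prev : Int), S.length = m → S.Nodup → a ∈ S →
    S.length ≤ n.toNat →
    pvWgt T a n S prev
    = (((PySem.List.permutations S S.length).map
          (fun q => if 0 < pvChain T prev q then (-1 : Int) ^ (n.toNat - S.length + pvIdx q a) else 0)).sum,
       ((PySem.List.permutations S S.length).map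
          (fun q => if pvChain T prev q < 0 then (-1 : Int) ^ (n.toNat - S.length + pvIdx q a) else 0)).sum) := by
  intro m
  induction m using Nat.strong_induction_on with
  | _ m IH =>
    intro S prev hlen hnd haS hle
    have hne : S.length ≠ 0 := by
      intro h0
      rw [List.length_eq_zero_iff] at h0
      subst h0
      simp at haS
    obtain ⟨r, hr⟩ : ∃ r, S.length = r + 1 := ⟨S.length - 1, by omega⟩
    rw [pvWgt]
    rw [List.attach_map_val (f := fun x =>
      (pvLk T prev x,
       if x = a then
         ((-1 : Int) ^ (n.toNat - S.length) * (pvCnt T (S.filter (fun y => y != a)) a).1,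
          (-1 : Int) ^ (n.toNat - S.length) * (pvCnt T (S.filter (fun y => y != a)) a).2)
       else pvWgt T a n (S.filter (fun y => y != x)) x))]
    rw [pv_foldl_pair_sum, List.map_map, List.map_map]
    rw [pv_perm_sum_decomp S r _ hr, pv_perm_sum_decomp S r _ hr]
    rw [pv_sum_range_eraseIdx S hnd (fun x l =>
      ((PySem.List.permutations l r).map
        (fun q => if 0 < pvChain T prev (x :: q) then
          (-1 : Int) ^ (n.toNat - S.length + pvIdx (x :: q) a) else 0)).sum)]
    rw [pv_sum_range_eraseIdx S hnd (fun x l =>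
      ((PySem.List.permutations l r).map
        (fun q => if pvChain T prev (x :: q) < 0 then
          (-1 : Int) ^ (n.toNat - S.length + pvIdx (x :: q) a) else 0)).sum)]
    simp only [Prod.mk.injEq]
    constructor
    · refine congrArg List.sum (List.map_congr_left ?_)
      intro x hx
      have hlenf : (S.filter (fun y => y != x)).length = r := by
        rw [pv_filter_ne_length S hnd x hx]; omega
      have hndf : (S.filter (fun y => y != x)).Nodup := List.Nodup.filter _ hnd
      simp only [Function.comp_apply]
      by_cases hxa : x = a
      · subst hxa
        have hrw : ((PySem.List.permutations (S.filter (fun y => y != x)) r).map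
            (fun q => if 0 < pvChain T prev (x :: q) then
              (-1 : Int) ^ (n.toNat - S.length + pvIdx (x :: q) x) else 0)).sum
          = ((PySem.List.permutations (S.filter (fun y => y != x)) r).map
            (fun q => (-1 : Int) ^ (n.toNat - S.length) *
              (if 0 < pvLk T prev x * pvChain T x q then (1 : Int) else 0))).sum := by
          refine congrArg List.sum (List.map_congr_left fun q _ => ?_)
          rw [pv_idx_cons_self, Nat.add_zero, mul_ite, mul_one, mul_zero]
          rfl
        rw [hrw, List.sum_map_mul_left]
        rw [pv_cnt_spec T r (S.filter (fun y => y != x)) x hlenf hndf, hlenf]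
        simp only [(pv_sign_sums (pvLk T prev x)
            (PySem.List.permutations (S.filter (fun y => y != x)) r)
            (fun q => pvChain T x q) (fun _ => (1 : Int))).1]
        simp [gt_iff_lt, mul_ite, mul_zero]
      · have haf : a ∈ S.filter (fun y => y != x) :=
          List.mem_filter.mpr ⟨haS, by simpa using fun h => hxa h.symm⟩
        have hrw : ((PySem.List.permutations (S.filter (fun y => y != x)) r).map
            (fun q => if 0 < pvChain T prev (x :: q) then
              (-1 : Int) ^ (n.toNat - S.length + pvIdx (x :: q) a) else 0)).sum
          = ((PySem.List.permutations (S.filter (fun y => y != x)) r).map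
            (fun q => if 0 < pvLk T prev x * pvChain T x q then
              (-1 : Int) ^ (n.toNat - r + pvIdx q a) else 0)).sum := by
          refine congrArg List.sum (List.map_congr_left fun q hq => ?_)
          have hperm : q.Perm (S.filter (fun y => y != x)) :=
            PySem.List.perm_of_mem_permutations (by rw [hlenf]; exact hq)
          have haq : a ∈ q := hperm.mem_iff.mpr haf
          rw [pv_idx_cons_ne x a q hxa haq]
          rw [show n.toNat - S.length + (pvIdx q a + 1) = n.toNat - r + pvIdx q a by omega]
          rfl
        rw [hrw]
        rw [IH r (by omega) (S.filter (fun y => y != x)) x hlenf hndf haf (by omega), hlenf]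
        simp only [(pv_sign_sums (pvLk T prev x)
            (PySem.List.permutations (S.filter (fun y => y != x)) r)
            (fun q => pvChain T x q) (fun q => (-1 : Int) ^ (n.toNat - r + pvIdx q a))).1]
        simp [gt_iff_lt, hxa]
    · refine congrArg List.sum (List.map_congr_left ?_)
      intro x hx
      have hlenf : (S.filter (fun y => y != x)).length = r := by
        rw [pv_filter_ne_length S hnd x hx]; omega
      have hndf : (S.filter (fun y => y != x)).Nodup := List.Nodup.filter _ hnd
      simp only [Function.comp_apply]
      by_cases hxa : x = a
      · subst hxa
        have hrw : ((PySem.List.permutations (S.filter (fun y => y != x)) r).map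
            (fun q => if pvChain T prev (x :: q) < 0 then
              (-1 : Int) ^ (n.toNat - S.length + pvIdx (x :: q) x) else 0)).sum
          = ((PySem.List.permutations (S.filter (fun y => y != x)) r).map
            (fun q => (-1 : Int) ^ (n.toNat - S.length) *
              (if pvLk T prev x * pvChain T x q < 0 then (1 : Int) else 0))).sum := by
          refine congrArg List.sum (List.map_congr_left fun q _ => ?_)
          rw [pv_idx_cons_self, Nat.add_zero, mul_ite, mul_one, mul_zero]
          rfl
        rw [hrw, List.sum_map_mul_left]
        rw [pv_cnt_spec T r (S.filter (fun y => y != x)) x hlenf hndf, hlenf]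
        simp only [(pv_sign_sums (pvLk T prev x)
            (PySem.List.permutations (S.filter (fun y => y != x)) r)
            (fun q => pvChain T x q) (fun _ => (1 : Int))).2]
        simp [gt_iff_lt, mul_ite, mul_zero]
      · have haf : a ∈ S.filter (fun y => y != x) :=
          List.mem_filter.mpr ⟨haS, by simpa using fun h => hxa h.symm⟩
        have hrw : ((PySem.List.permutations (S.filter (fun y => y != x)) r).map
            (fun q => if pvChain T prev (x :: q) < 0 then
              (-1 : Int) ^ (n.toNat - S.length + pvIdx (x :: q) a) else 0)).sum
          = ((PySem.List.permutations (S.filter (fun y => y != x)) r).map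
            (fun q => if pvLk T prev x * pvChain T x q < 0 then
              (-1 : Int) ^ (n.toNat - r + pvIdx q a) else 0)).sum := by
          refine congrArg List.sum (List.map_congr_left fun q hq => ?_)
          have hperm : q.Perm (S.filter (fun y => y != x)) :=
            PySem.List.perm_of_mem_permutations (by rw [hlenf]; exact hq)
          have haq : a ∈ q := hperm.mem_iff.mpr haf
          rw [pv_idx_cons_ne x a q hxa haq]
          rw [show n.toNat - S.length + (pvIdx q a + 1) = n.toNat - r + pvIdx q a by omega]
          rfl
        rw [hrw]
        rw [IH r (by omega) (S.filter (fun y => y != x)) x hlenf hndf haf (by omega), hlenf]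
        simp only [(pv_sign_sums (pvLk T prev x)
            (PySem.List.permutations (S.filter (fun y => y != x)) r)
            (fun q => pvChain T x q) (fun q => (-1 : Int) ^ (n.toNat - r + pvIdx q a))).2]
        simp [gt_iff_lt, hxa]

lemma pv_pend_spec (T : List (Int × Int × Int)) (a : Int) :
    ∀ (m : Nat) (S : List Int) (prev : Int), S.length = m → S.Nodup →
    pvPend T a S prev
    = ((PySem.List.permutations S S.length).map
        (fun q => if q.getLastD prev = a then pvChain T prev q else 0)).sum := by
  intro m
  induction m using Nat.strong_induction_on with
  | _ m IH =>
    intro S prev hlen hnd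
    by_cases hS : S = []
    · subst hS
      simp [pvPend, PySem.List.permutations_zero, pvChain]
    · have hne : S.length ≠ 0 := by simpa [List.length_eq_zero_iff] using hS
      obtain ⟨r, hr⟩ : ∃ r, S.length = r + 1 := ⟨S.length - 1, by omega⟩
      rw [pvPend, if_neg (by simpa [List.isEmpty_iff] using hS)]
      rw [List.attach_map_val
        (f := fun x => pvLk T prev x * pvPend T a (S.filter (fun y => y != x)) x)]
      rw [pv_perm_sum_decomp S r _ hr]
      rw [pv_sum_range_eraseIdx S hnd (fun x l =>
        ((PySem.List.permutations l r).map
          (fun q => if (x :: q).getLastD prev = a then pvChain T prev (x :: q) else 0)).sum)]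
      refine congrArg List.sum (List.map_congr_left ?_)
      intro x hx
      have hlenf : (S.filter (fun y => y != x)).length = r := by
        rw [pv_filter_ne_length S hnd x hx]; omega
      have hndf : (S.filter (fun y => y != x)).Nodup := List.Nodup.filter _ hnd
      rw [IH r (by omega) (S.filter (fun y => y != x)) x hlenf hndf, hlenf]
      rw [show (fun q => if (x :: q).getLastD prev = a then pvChain T prev (x :: q) else 0)
            = (fun q => pvLk T prev x * (if q.getLastD x = a then pvChain T x q else 0)) from by
        funext q
        rw [List.getLastD_cons, mul_ite, mul_zero]
        rfl]
      rw [List.sum_map_mul_left]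

lemma pv_pall_spec (T : List (Int × Int × Int)) :
    ∀ (m : Nat) (S : List Int) (prev : Int), S.length = m → S.Nodup →
    pvPall T S prev
    = ((PySem.List.permutations S S.length).map (fun q => pvChain T prev q)).sum := by
  intro m
  induction m using Nat.strong_induction_on with
  | _ m IH =>
    intro S prev hlen hnd
    by_cases hS : S = []
    · subst hS
      simp [pvPall, PySem.List.permutations_zero, pvChain]
    · have hne : S.length ≠ 0 := by simpa [List.length_eq_zero_iff] using hS
      obtain ⟨r, hr⟩ : ∃ r, S.length = r + 1 := ⟨S.length - 1, by omega⟩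
      rw [pvPall, if_neg (by simpa [List.isEmpty_iff] using hS)]
      rw [List.attach_map_val
        (f := fun x => pvLk T prev x * pvPall T (S.filter (fun y => y != x)) x)]
      rw [pv_perm_sum_decomp S r _ hr]
      rw [pv_sum_range_eraseIdx S hnd (fun x l =>
        ((PySem.List.permutations l r).map (fun q => pvChain T prev (x :: q))).sum)]
      refine congrArg List.sum (List.map_congr_left ?_)
      intro x hx
      have hlenf : (S.filter (fun y => y != x)).length = r := by
        rw [pv_filter_ne_length S hnd x hx]; omega
      have hndf : (S.filter (fun y => y != x)).Nodup := List.Nodup.filter _ hnd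
      rw [IH r (by omega) (S.filter (fun y => y != x)) x hlenf hndf, hlenf]
      rw [show (fun q => pvChain T prev (x :: q))
            = (fun q => pvLk T prev x * pvChain T x q) from by funext q; rfl]
      rw [List.sum_map_mul_left]

lemma pv_pyGetD_neg_one (p : List Int) (h : p ≠ []) :
    PySem.List.pyGetD p (-1) 0 = p.getLastD 0 := by
  have hl : 1 ≤ p.length := Nat.one_le_iff_ne_zero.mpr (by simpa [List.length_eq_zero_iff] using h)
  simp [PySem.List.pyGetD, PySem.List.pyGet?, PySem.List.pyIdx?, hl, List.getLastD_eq_getLast?,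
    List.getLast?_eq_getElem?]

lemma pv_ea_eq (T : List (Int × Int × Int)) (a : Int) (S : List Int)
    (hS : S.Nodup) (ha : a ∈ S) :
    (if PySem.List.len S = 1 then (1 : Int) else
      (PySem.List.permutations S S.length).foldl (fun ea p =>
        if PySem.List.pyGetD p (-1) 0 ≠ a then ea
        else ea + (PySem.List.pyRange 0 (PySem.List.len p - 1)).foldl
          (fun prod k => prod * pvLk T (PySem.List.pyGetD p k 0) (PySem.List.pyGetD p (k + 1) 0)) 1) 0)
    = (S.map (fun x => pvPend T a (S.filter (fun y => y != x)) x)).sum := by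
  by_cases h1 : PySem.List.len S = 1
  · rw [if_pos h1]
    have hlen1 : S.length = 1 := by
      rw [PySem.List.len_eq] at h1
      exact_mod_cast h1
    obtain ⟨y, hy⟩ := List.length_eq_one_iff.mp hlen1
    subst hy
    have hya : a = y := by simpa using ha
    subst hya
    have hfilter : [a].filter (fun y => y != a) = [] := by simp
    rw [List.map_cons, List.map_nil, hfilter, List.sum_cons, List.sum_nil, pvPend]
    simp
  · rw [if_neg h1]
    have hne : S ≠ [] := by rintro rfl; simp at ha
    have hlen0 : S.length ≠ 0 := by simpa [List.length_eq_zero_iff] using hne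
    obtain ⟨r, hr⟩ : ∃ r, S.length = r + 1 := ⟨S.length - 1, by omega⟩
    have hbody : List.foldl (fun ea p =>
        if PySem.List.pyGetD p (-1) 0 ≠ a then ea
        else ea + (PySem.List.pyRange 0 (PySem.List.len p - 1)).foldl
          (fun prod k => prod * pvLk T (PySem.List.pyGetD p k 0) (PySem.List.pyGetD p (k + 1) 0)) 1) 0
        (PySem.List.permutations S S.length)
      = List.foldl (fun ea p => ea + (if p.getLastD 0 = a then pvEdge T p else 0)) 0
        (PySem.List.permutations S S.length) := by
      apply PySem.List.foldl_congr_mem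
      intro acc p hp
      have hplen : p.length = S.length := PySem.List.length_of_mem_permutations hp
      have hpne : p ≠ [] := by
        intro h
        rw [h] at hplen
        simp at hplen
        omega
      rw [pv_pyGetD_neg_one p hpne, PySem.List.len_eq, pv_prod_fold_eq_edge]
      by_cases hc : p.getLastD 0 = a
      · rw [if_neg (by simpa using hc), if_pos hc]
      · rw [if_pos (by simpa using hc), if_neg hc, add_zero]
    rw [hbody,
      PySem.List.foldl_add (g := fun p => if p.getLastD 0 = a then pvEdge T p else 0), zero_add]
    rw [pv_perm_sum_decomp S r _ hr]
    rw [pv_sum_range_eraseIdx S hS (fun x l => ((PySem.List.permutations l r).map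
        (fun q => if (x :: q).getLastD 0 = a then pvEdge T (x :: q) else 0)).sum)]
    refine congrArg List.sum (List.map_congr_left ?_)
    intro x hx
    have hlenf : (S.filter (fun y => y != x)).length = r := by
      rw [pv_filter_ne_length S hS x hx]; omega
    have hndf : (S.filter (fun y => y != x)).Nodup := List.Nodup.filter _ hS
    rw [pv_pend_spec T a r (S.filter (fun y => y != x)) x hlenf hndf, hlenf]
    refine congrArg List.sum (List.map_congr_left fun q _ => ?_)
    rw [List.getLastD_cons]
    rfl

lemma pv_bb_eq (T : List (Int × Int × Int)) (b : Int) (R : List Int)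
    (hR : R.Nodup) (hb : b ∈ R) :
    (if PySem.List.len R = 1 then (1 : Int) else
      (PySem.List.permutations R R.length).foldl (fun bb p =>
        if PySem.List.pyGetD p 0 0 ≠ b then bb
        else bb + (PySem.List.pyRange 0 (PySem.List.len p - 1)).foldl
          (fun prod k => prod * pvLk T (PySem.List.pyGetD p k 0) (PySem.List.pyGetD p (k + 1) 0)) 1) 0)
    = pvPall T (R.filter (fun y => y != b)) b := by
  by_cases h1 : PySem.List.len R = 1
  · rw [if_pos h1]
    have hlen1 : R.length = 1 := by
      rw [PySem.List.len_eq] at h1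
      exact_mod_cast h1
    obtain ⟨y, hy⟩ := List.length_eq_one_iff.mp hlen1
    subst hy
    have hyb : b = y := by simpa using hb
    subst hyb
    have hfilter : [b].filter (fun y => y != b) = [] := by simp
    rw [hfilter, pvPall]
    simp
  · rw [if_neg h1]
    have hne : R ≠ [] := by rintro rfl; simp at hb
    have hlen0 : R.length ≠ 0 := by simpa [List.length_eq_zero_iff] using hne
    obtain ⟨r, hr⟩ : ∃ r, R.length = r + 1 := ⟨R.length - 1, by omega⟩
    have hbody : List.foldl (fun bb p =>
        if PySem.List.pyGetD p 0 0 ≠ b then bb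
        else bb + (PySem.List.pyRange 0 (PySem.List.len p - 1)).foldl
          (fun prod k => prod * pvLk T (PySem.List.pyGetD p k 0) (PySem.List.pyGetD p (k + 1) 0)) 1) 0
        (PySem.List.permutations R R.length)
      = List.foldl (fun bb p => bb + (if p.getD 0 0 = b then pvEdge T p else 0)) 0
        (PySem.List.permutations R R.length) := by
      apply PySem.List.foldl_congr_mem
      intro acc p hp
      rw [PySem.List.pyGetD_ofNat', PySem.List.len_eq, pv_prod_fold_eq_edge]
      by_cases hc : p.getD 0 0 = b
      · rw [if_neg (by simpa using hc), if_pos hc]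
      · rw [if_pos (by simpa using hc), if_neg hc, add_zero]
    rw [hbody,
      PySem.List.foldl_add (g := fun p => if p.getD 0 0 = b then pvEdge T p else 0), zero_add]
    rw [pv_perm_sum_decomp R r _ hr]
    have hmid : ((List.range R.length).map (fun i =>
        ((PySem.List.permutations (R.eraseIdx i) r).map
          (fun q => if (R.getD i 0 :: q).getD 0 0 = b then pvEdge T (R.getD i 0 :: q) else 0)).sum)).sum
      = ((List.range R.length).map (fun i =>
          if R.getD i 0 = b then pvPall T (R.eraseIdx i) b else 0)).sum := by
      refine congrArg List.sum (List.map_congr_left ?_)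
      intro i hi
      have hilt : i < R.length := List.mem_range.mp hi
      have hlenE : (R.eraseIdx i).length = r := by
        rw [List.length_eraseIdx, if_pos hilt]; omega
      have hndE : (R.eraseIdx i).Nodup := List.Nodup.eraseIdx i hR
      by_cases hib : R.getD i 0 = b
      · rw [if_pos hib, pv_pall_spec T r (R.eraseIdx i) b hlenE hndE, hlenE]
        refine congrArg List.sum (List.map_congr_left fun q _ => ?_)
        rw [List.getD_cons_zero, if_pos hib, hib]
        rfl
      · rw [if_neg hib]
        apply List.sum_eq_zero
        intro t ht
        obtain ⟨q, _, rfl⟩ := List.mem_map.mp ht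
        rw [List.getD_cons_zero, if_neg hib]
    rw [hmid, pv_sum_unique_idx R b (fun l => pvPall T l b) hR hb,
      ← pv_filter_ne_eq_erase R hR b]

lemma pv_aab_eq (T : List (Int × Int × Int)) (n a : Int) (h0 : 0 ≤ a) (h1 : a < n) :
    (PySem.List.permutations (PySem.List.pyRange 0 n) (PySem.List.pyRange 0 n).length).foldl
      (fun val perm =>
        if (PySem.List.pyRange 0 (n - 1)).foldl
            (fun prod k => prod * pvLk T (PySem.List.pyGetD perm k 0) (PySem.List.pyGetD perm (k + 1) 0)) 1 > 0 then
          match PySem.List.index? perm a with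
          | some pos => val + (-1 : Int) ^ pos
          | none => val
        else val) 0
    = (PySem.List.pyRange 0 n).foldl (fun val x =>
        val + (if x = a then (pvCnt T ((PySem.List.pyRange 0 n).filter (fun y => y != x)) a).1
               else (pvWgt T a n ((PySem.List.pyRange 0 n).filter (fun y => y != x)) x).1)) 0 := by
  have hn0 : 0 < n := lt_of_le_of_lt h0 h1
  have hlenr : (PySem.List.pyRange 0 n).length = n.toNat := by
    rw [PySem.List.length_pyRange_one]; omega
  have hnd : (PySem.List.pyRange 0 n).Nodup := PySem.List.nodup_pyRange_one 0 n
  have haR : a ∈ PySem.List.pyRange 0 n := PySem.List.mem_pyRange_one.mpr ⟨h0, h1⟩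
  obtain ⟨r, hr⟩ : ∃ r, (PySem.List.pyRange 0 n).length = r + 1 := ⟨n.toNat - 1, by omega⟩
  have hbody : List.foldl
      (fun val perm =>
        if (PySem.List.pyRange 0 (n - 1)).foldl
            (fun prod k => prod * pvLk T (PySem.List.pyGetD perm k 0) (PySem.List.pyGetD perm (k + 1) 0)) 1 > 0 then
          match PySem.List.index? perm a with
          | some pos => val + (-1 : Int) ^ pos
          | none => val
        else val) 0 (PySem.List.permutations (PySem.List.pyRange 0 n) (PySem.List.pyRange 0 n).length)
    = List.foldl (fun val perm =>
        val + (if 0 < pvEdge T perm then (-1 : Int) ^ (pvIdx perm a) else 0)) 0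
        (PySem.List.permutations (PySem.List.pyRange 0 n) (PySem.List.pyRange 0 n).length) := by
    apply PySem.List.foldl_congr_mem
    intro acc perm hp
    have hplen : perm.length = (PySem.List.pyRange 0 n).length :=
      PySem.List.length_of_mem_permutations hp
    have hperm : perm.Perm (PySem.List.pyRange 0 n) := PySem.List.perm_of_mem_permutations hp
    have hap : a ∈ perm := hperm.mem_iff.mpr haR
    have hbound : n - 1 = ((perm.length : Int)) - 1 := by
      rw [hplen, hlenr]; omega
    rw [hbound, pv_prod_fold_eq_edge]
    obtain ⟨k, hk⟩ := Option.isSome_iff_exists.mp ((PySem.List.index?_isSome_iff perm a).mpr hap)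
    have hik : pvIdx perm a = k := by unfold pvIdx; rw [hk]; rfl
    rw [hk]
    by_cases hc : 0 < pvEdge T perm
    · rw [if_pos (by exact hc), if_pos hc, hik]
    · rw [if_neg (by exact hc), if_neg hc, add_zero]
  rw [hbody,
    PySem.List.foldl_add (g := fun perm => if 0 < pvEdge T perm then (-1 : Int) ^ (pvIdx perm a) else 0),
    zero_add]
  rw [PySem.List.foldl_add (g := fun x =>
    if x = a then (pvCnt T ((PySem.List.pyRange 0 n).filter (fun y => y != x)) a).1
    else (pvWgt T a n ((PySem.List.pyRange 0 n).filter (fun y => y != x)) x).1), zero_add]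
  rw [pv_perm_sum_decomp _ r _ hr]
  rw [pv_sum_range_eraseIdx _ hnd (fun x l => ((PySem.List.permutations l r).map
      (fun q => if 0 < pvEdge T (x :: q) then (-1 : Int) ^ (pvIdx (x :: q) a) else 0)).sum)]
  refine congrArg List.sum (List.map_congr_left ?_)
  intro x hx
  have hlenf : ((PySem.List.pyRange 0 n).filter (fun y => y != x)).length = r := by
    rw [pv_filter_ne_length _ hnd x hx]; omega
  have hndf : ((PySem.List.pyRange 0 n).filter (fun y => y != x)).Nodup :=
    List.Nodup.filter _ hnd
  by_cases hxa : x = a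
  · subst hxa
    rw [if_pos rfl]
    rw [pv_cnt_spec T r _ x hlenf hndf, hlenf]
    dsimp only
    refine congrArg List.sum (List.map_congr_left fun q _ => ?_)
    rw [pv_idx_cons_self, pow_zero]
    rfl
  · rw [if_neg hxa]
    have haf : a ∈ (PySem.List.pyRange 0 n).filter (fun y => y != x) :=
      List.mem_filter.mpr ⟨haR, by simpa using fun h => hxa h.symm⟩
    rw [pv_wgt_spec T a n r _ x hlenf hndf haf (by omega), hlenf]
    dsimp only
    refine congrArg List.sum (List.map_congr_left fun q hq => ?_)
    have hperm : q.Perm ((PySem.List.pyRange 0 n).filter (fun y => y != x)) :=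
      PySem.List.perm_of_mem_permutations (by rw [hlenf]; exact hq)
    have haq : a ∈ q := hperm.mem_iff.mpr haf
    rw [pv_idx_cons_ne x a q hxa haq]
    rw [show n.toNat - r + pvIdx q a = pvIdx q a + 1 by omega]
    rfl

-- ===== VERDICT (by name: the statement is the Claim_ definition above) =====
theorem compute_M_entry_spec : Claim_equal_compute_M_entry := by
  intro T n a b _ hpre
  unfold Spec_compute_M_entry compute_M_entry compute_M_entry_alt
  by_cases hab : a = b
  · subst hab
    simp only []
    obtain ⟨h0, h1⟩ := hpre rfl
    exact pv_aab_eq T n a h0 h1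
  · simp only [if_neg hab]
    apply PySem.List.foldl_congr_mem
    intro val mask _
    dsimp only
    rw [pv_ea_eq, pv_bb_eq]
    · exact ((PySem.List.sorted_perm _ _ _).nodup_iff).mpr
        (PySem.Set.nodup_add _ _ (PySem.Set.nodup_ofList _))
    · simp [PySem.List.mem_sorted, PySem.Set.mem_add]
    · exact ((PySem.List.sorted_perm _ _ _).nodup_iff).mpr
        (PySem.Set.nodup_add _ _ (PySem.Set.nodup_ofList _))
    · simp [PySem.List.mem_sorted, PySem.Set.mem_add]
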